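-- pv_equiv track=rewrite | github.com/tingshui/AIAssistant | AI.assistant/src/ai_assistant/visit_event_filter.py | _strip_lines_by_ranges
-- ===== SOURCE A (Python) =====
-- from typing import Any, Dict, List, Optional, Tuple
--
-- def _merge_ranges(ranges: List[Tuple[int, int]]) -> List[Tuple[int, int]]:
--     if not ranges:
--         return []
--     merged: List[Tuple[int, int]] = []
--     cur_s, cur_e = ranges[0]
--     for s, e in ranges[1:]:
--         if s <= cur_e + 1:
--             cur_e = max(cur_e, e)
--         else:
--             merged.append((cur_s, cur_e))
--             cur_s, cur_e = s, e
--     merged.append((cur_s, cur_e))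
--     return merged
--
-- def _strip_lines_by_ranges(lines: List[str], ranges: List[Tuple[int, int]]) -> Tuple[str, Dict[str, Any]]:
--     n = len(lines)
--     kill = [False] * n
--     merged = _merge_ranges(ranges)
--     for s, e in merged:
--         for i in range(s - 1, e):
--             if 0 <= i < n:
--                 kill[i] = True
--     kept = [ln for i, ln in enumerate(lines) if not kill[i]]
--     dbg = {
--         "vitals_ranges_in": len(ranges),
--         "vitals_ranges_merged": len(merged),
--         "lines_total": n,
--         "lines_removed": sum(kill),
--         "lines_kept": len(kept),
--     }
--     return "\n".join(kept), dbg
-- ===== SOURCE B (Python) =====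
-- from typing import Any, Dict, List, Tuple
--
--
-- def _merge_ranges(ranges: List[Tuple[int, int]]) -> List[Tuple[int, int]]:
--     if not ranges:
--         return []
--     merged: List[Tuple[int, int]] = []
--     cur_s, cur_e = ranges[0]
--     for s, e in ranges[1:]:
--         if s <= cur_e + 1:
--             cur_e = max(cur_e, e)
--         else:
--             merged.append((cur_s, cur_e))
--             cur_s, cur_e = s, e
--     merged.append((cur_s, cur_e))
--     return merged
--
--
-- def _strip_lines_by_ranges(lines: List[str], ranges: List[Tuple[int, int]]) -> Tuple[str, Dict[str, Any]]:
--     # One pass over the lines, testing each index directly against the merged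
--     # ranges: no boolean kill array, no per-range index loop.
--     merged = _merge_ranges(ranges)
--     kept: List[str] = []
--     removed = 0
--     for i, ln in enumerate(lines):
--         if any(s - 1 <= i < e for s, e in merged):
--             removed += 1
--         else:
--             kept.append(ln)
--     dbg = {
--         "vitals_ranges_in": len(ranges),
--         "vitals_ranges_merged": len(merged),
--         "lines_total": len(lines),
--         "lines_removed": removed,
--         "lines_kept": len(kept),
--     }
--     return "\n".join(kept), dbg
-- ===== Notes on version B (the rewrite author's own statement) =====
-- stated objective: alternative
-- what changed: Instead of materialising a boolean kill array by iterating over range(s-1, e) for every merged range and then filtering by it, B makes a single pass over the lines, testing each index directly against the merged ranges, collecting kept lines and counting removals as it goes (no mark array, no per-range index loop).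
import Mathlib
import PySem

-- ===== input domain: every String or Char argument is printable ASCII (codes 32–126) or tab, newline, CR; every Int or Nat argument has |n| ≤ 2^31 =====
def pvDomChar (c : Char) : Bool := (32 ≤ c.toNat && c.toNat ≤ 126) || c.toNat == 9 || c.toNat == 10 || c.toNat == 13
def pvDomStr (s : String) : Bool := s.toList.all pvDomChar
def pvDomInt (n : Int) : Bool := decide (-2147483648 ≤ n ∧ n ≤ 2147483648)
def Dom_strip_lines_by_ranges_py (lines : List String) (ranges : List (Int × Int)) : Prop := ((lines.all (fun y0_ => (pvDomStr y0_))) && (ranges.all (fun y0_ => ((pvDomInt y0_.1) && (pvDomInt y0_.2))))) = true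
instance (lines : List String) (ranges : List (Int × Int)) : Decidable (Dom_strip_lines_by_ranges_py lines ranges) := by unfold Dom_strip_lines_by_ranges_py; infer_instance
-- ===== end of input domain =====

-- B drops A's boolean kill array (filled by a per-range loop over range(s-1, e)) in favour of a
-- single pass over the lines that tests each index directly against the merged ranges.

-- ===== PORT A =====
-- _merge_ranges, shared verbatim by both Pythons (loop state: cur_s, cur_e, merged)
def mergeRangesGo (cur_s cur_e : Int) (rest : List (Int × Int)) (merged : List (Int × Int)) : List (Int × Int) :=
  match rest with
  | [] => merged ++ [(cur_s, cur_e)]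
  | (s, e) :: t =>
    if s ≤ cur_e + 1 then mergeRangesGo cur_s (max cur_e e) t merged
    else mergeRangesGo s e t (merged ++ [(cur_s, cur_e)])

def mergeRanges (ranges : List (Int × Int)) : List (Int × Int) :=
  match ranges with
  | [] => []
  | (s, e) :: t => mergeRangesGo s e t []

def strip_lines_by_ranges_py (lines : List String) (ranges : List (Int × Int)) : String × (List (String × Int)) :=
  let n : Int := lines.length
  let merged := mergeRanges ranges
  let kill : List Bool := merged.foldl (fun k se =>
    (PySem.List.pyRange (se.1 - 1) se.2 1).foldl (fun k i =>
      if 0 ≤ i ∧ i < n then k.set i.toNat true else k) k) (List.replicate lines.length false)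
  let kept : List String := ((PySem.List.enumerate lines).filter
    (fun p => !(PySem.List.pyGetD kill p.1 false))).map (·.2)
  let dbg : List (String × Int) :=
    [("vitals_ranges_in", (ranges.length : Int)),
     ("vitals_ranges_merged", (merged.length : Int)),
     ("lines_total", n),
     ("lines_removed", (kill.count true : Int)),
     ("lines_kept", (kept.length : Int))]
  (PySem.Str.join "\n" kept, dbg)

-- ===== PORT B =====
def strip_lines_by_ranges_py_alt (lines : List String) (ranges : List (Int × Int)) : String × (List (String × Int)) :=
  let merged := mergeRanges ranges
  let st := (PySem.List.enumerate lines).foldl (fun st p =>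
      if merged.any (fun se => decide (se.1 - 1 ≤ p.1 ∧ p.1 < se.2)) then (st.1, st.2 + 1)
      else (st.1 ++ [p.2], st.2)) (([] : List String), (0 : Int))
  let dbg : List (String × Int) :=
    [("vitals_ranges_in", (ranges.length : Int)),
     ("vitals_ranges_merged", (merged.length : Int)),
     ("lines_total", (lines.length : Int)),
     ("lines_removed", st.2),
     ("lines_kept", (st.1.length : Int))]
  (PySem.Str.join "\n" st.1, dbg)

-- ===== PRECONDITION & SPEC =====
def Spec_strip_lines_by_ranges_py (lines : List String) (ranges : List (Int × Int)) (out : String × (List (String × Int))) : Prop := out = strip_lines_by_ranges_py_alt lines ranges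
instance (lines : List String) (ranges : List (Int × Int)) (out : String × (List (String × Int))) : Decidable (Spec_strip_lines_by_ranges_py lines ranges out) := by unfold Spec_strip_lines_by_ranges_py; infer_instance

-- ===== CLAIM (what is proved, stated in full; the proofs are below) =====
def Claim_equal_strip_lines_by_ranges_py : Prop := ∀ (lines : List String) (ranges : List (Int × Int)), Dom_strip_lines_by_ranges_py lines ranges → Spec_strip_lines_by_ranges_py lines ranges (strip_lines_by_ranges_py lines ranges)

-- ===== LEMMAS AND PROOFS =====

-- marking loop over one list of indices: length preserved, entry j becomes old ∨ (j ∈ L)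
theorem mark_fold (m : Nat) (L : List Int) (k : List Bool) (hk : k.length = m) :
    (L.foldl (fun k i => if 0 ≤ i ∧ i < (m : Int) then k.set i.toNat true else k) k).length = m ∧
    ∀ j : Nat, j < m →
      (L.foldl (fun k i => if 0 ≤ i ∧ i < (m : Int) then k.set i.toNat true else k) k).getD j false
        = (k.getD j false || decide ((j : Int) ∈ L)) := by
  induction L generalizing k with
  | nil => simp [hk]
  | cons i L ih =>
    simp only [List.foldl_cons]
    have hk1 : (if 0 ≤ i ∧ i < (m : Int) then k.set i.toNat true else k).length = m := by
      split <;> simp [hk]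
    obtain ⟨h1, h2⟩ := ih _ hk1
    refine ⟨h1, fun j hj => ?_⟩
    rw [h2 j hj]
    have hkey : (if 0 ≤ i ∧ i < (m : Int) then k.set i.toNat true else k).getD j false
        = (k.getD j false || decide ((j : Int) = i)) := by
      split
      · rename_i h
        by_cases hij : i.toNat = j
        · have : (j : Int) = i := by omega
          simp [List.getD, hij, this, hk, hj]
        · have : ¬ ((j : Int) = i) := by omega
          simp [List.getD, hij, this]
      · rename_i h
        have : ¬ ((j : Int) = i) := by omega
        simp [this]
    rw [hkey]
    simp [List.mem_cons, Bool.or_assoc]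

-- iterating the marking loop over all merged ranges
theorem mark_ranges (m : Nat) (ms : List (Int × Int)) (k : List Bool) (hk : k.length = m) :
    (ms.foldl (fun k se => (PySem.List.pyRange (se.1 - 1) se.2 1).foldl
        (fun k i => if 0 ≤ i ∧ i < (m : Int) then k.set i.toNat true else k) k) k).length = m ∧
    ∀ j : Nat, j < m →
      (ms.foldl (fun k se => (PySem.List.pyRange (se.1 - 1) se.2 1).foldl
          (fun k i => if 0 ≤ i ∧ i < (m : Int) then k.set i.toNat true else k) k) k).getD j false
        = (k.getD j false || ms.any (fun se => decide (se.1 - 1 ≤ (j : Int) ∧ (j : Int) < se.2))) := by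
  induction ms generalizing k with
  | nil => simp [hk]
  | cons se ms ih =>
    simp only [List.foldl_cons]
    obtain ⟨hl1, he1⟩ := mark_fold m (PySem.List.pyRange (se.1 - 1) se.2 1) k hk
    obtain ⟨hl2, he2⟩ := ih _ hl1
    refine ⟨hl2, fun j hj => ?_⟩
    rw [he2 j hj, he1 j hj]
    simp [PySem.List.mem_pyRange_one, Bool.or_assoc]

-- B's single pass: splits the enumerated lines into kept lines and a removed count
theorem split_fold (q : Int × String → Bool) (L : List (Int × String)) (A : List String) (c : Int) :
    L.foldl (fun st p => if q p then (st.1, st.2 + 1) else (st.1 ++ [p.2], st.2)) (A, c)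
      = (A ++ (L.filter (fun p => !(q p))).map (·.2), c + (L.countP q : Int)) := by
  induction L generalizing A c with
  | nil => simp
  | cons p L ih =>
    simp only [List.foldl_cons]
    by_cases hq : q p = true
    · rw [if_pos hq, ih]
      simp [hq]
      omega
    · rw [if_neg hq, ih]
      simp [hq]

-- ===== VERDICT (by name: the statement is the Claim_ definition above) =====
theorem strip_lines_by_ranges_py_spec : Claim_equal_strip_lines_by_ranges_py := by
  intro lines ranges _
  unfold Spec_strip_lines_by_ranges_py strip_lines_by_ranges_py strip_lines_by_ranges_py_alt
  dsimp only
  rw [split_fold]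
  obtain ⟨hklen, hkval⟩ := mark_ranges lines.length (mergeRanges ranges)
    (List.replicate lines.length false) (by simp)
  set merged := mergeRanges ranges with hmg
  set kill := merged.foldl (fun k se => (PySem.List.pyRange (se.1 - 1) se.2 1).foldl
      (fun k i => if 0 ≤ i ∧ i < (lines.length : Int) then k.set i.toNat true else k) k)
      (List.replicate lines.length false) with hkill
  have hkval' : ∀ j : Nat, j < lines.length → kill.getD j false
      = merged.any (fun se => decide (se.1 - 1 ≤ (j : Int) ∧ (j : Int) < se.2)) := by
    intro j hj; rw [hkval j hj]; simp
  have hfilter : ((PySem.List.enumerate lines).filter (fun p => !(PySem.List.pyGetD kill p.1 false)))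
      = ((PySem.List.enumerate lines).filter
          (fun p => !(merged.any (fun se => decide (se.1 - 1 ≤ p.1 ∧ p.1 < se.2))))) := by
    apply List.filter_congr
    intro p hp
    rw [PySem.List.mem_enumerate_iff] at hp
    obtain ⟨j, hjlt, rfl⟩ := hp
    simp only [zero_add]
    rw [PySem.List.pyGetD_natCast, hkval' j hjlt]
  have hcount : (kill.count true : Int)
      = (0 : Int) + ((PySem.List.enumerate lines).countP
          (fun p => merged.any (fun se => decide (se.1 - 1 ≤ p.1 ∧ p.1 < se.2))) : Int) := by
    have hkl : kill = (List.range lines.length).map (fun j : Nat => merged.any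
        (fun se => decide (se.1 - 1 ≤ (j : Int) ∧ (j : Int) < se.2))) := by
      apply List.ext_getElem
      · simp [hklen]
      · intro j h1 h2
        have hj : j < lines.length := by simpa [hklen] using h1
        have hgv := hkval' j hj
        rw [List.getD_eq_getElem?_getD, List.getElem?_eq_getElem h1, Option.getD_some] at hgv
        simp [hgv]
    have hc1 : kill.count true = (List.range lines.length).countP
        (fun j : Nat => merged.any (fun se => decide (se.1 - 1 ≤ (j : Int) ∧ (j : Int) < se.2))) := by
      rw [hkl, List.count, List.countP_map]
      apply List.countP_congr
      intro j _
      simp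
    have hc2 : (PySem.List.enumerate lines).countP
          (fun p => merged.any (fun se => decide (se.1 - 1 ≤ p.1 ∧ p.1 < se.2)))
        = (List.range lines.length).countP
            (fun j : Nat => merged.any (fun se => decide (se.1 - 1 ≤ (j : Int) ∧ (j : Int) < se.2))) := by
      have hmap : (PySem.List.enumerate lines).countP
            (fun p => merged.any (fun se => decide (se.1 - 1 ≤ p.1 ∧ p.1 < se.2)))
          = ((PySem.List.enumerate lines).map (·.1)).countP
              (fun i : Int => merged.any (fun se => decide (se.1 - 1 ≤ i ∧ i < se.2))) := by
        rw [List.countP_map]; rfl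
      rw [hmap, PySem.List.map_fst_enumerate, PySem.List.pyRange_one, List.countP_map]
      have hrange : ((0 : Int) + (lines.length : Int) - 0).toNat = lines.length := by omega
      rw [hrange]
      apply List.countP_congr
      intro j _
      simp
    rw [hc1, hc2]; omega
  rw [hfilter, hcount]
  simp
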